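-- pv_equiv track=rewrite | github.com/Khang1904/MindX-CS | CSB/SS08/excercises/basic/10.py | sortAndSearch
-- ===== SOURCE A (Python) =====
-- def sortAndSearch(arr, target):
--     # Sort the array
--     for i in range(len(arr)):
--         min_index = i
--         for j in range(i + 1, len(arr)):
--             if arr[j] < arr[min_index]:
--                 min_index = j
--         arr[i], arr[min_index] = arr[min_index], arr[i]
--
--     # Perform binary search
--     left, right = 0, len(arr) - 1
--     while left <= right:
--         mid = (left + right) // 2
--         if arr[mid] == target:
--             return arr, mid
--         elif arr[mid] < target:
--             left = mid + 1
--         else: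
--             right = mid - 1
--
--     return arr, -1
-- ===== SOURCE B (Python) =====
-- def sortAndSearch(arr, target):
--     # Replace the O(n^2) selection sort with the built-in sort (in place via slice assignment);
--     # the binary-search block is unchanged, so the returned index is identical.
--     arr[:] = sorted(arr)
--
--     left, right = 0, len(arr) - 1
--     while left <= right:
--         mid = (left + right) // 2
--         if arr[mid] == target:
--             return arr, mid
--         elif arr[mid] < target:
--             left = mid + 1
--         else:
--             right = mid - 1
--
--     return arr, -1
-- ===== Notes on version B (the rewrite author's own statement) =====
-- stated objective: faster
-- what changed: Replaced the hand-written O(n^2) selection-sort nested loop by Python's built-in sort written back in place (arr[:] = sorted(arr)); the binary-search block is unchanged, so the returned (arr, index) pair is identical.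
import Mathlib
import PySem

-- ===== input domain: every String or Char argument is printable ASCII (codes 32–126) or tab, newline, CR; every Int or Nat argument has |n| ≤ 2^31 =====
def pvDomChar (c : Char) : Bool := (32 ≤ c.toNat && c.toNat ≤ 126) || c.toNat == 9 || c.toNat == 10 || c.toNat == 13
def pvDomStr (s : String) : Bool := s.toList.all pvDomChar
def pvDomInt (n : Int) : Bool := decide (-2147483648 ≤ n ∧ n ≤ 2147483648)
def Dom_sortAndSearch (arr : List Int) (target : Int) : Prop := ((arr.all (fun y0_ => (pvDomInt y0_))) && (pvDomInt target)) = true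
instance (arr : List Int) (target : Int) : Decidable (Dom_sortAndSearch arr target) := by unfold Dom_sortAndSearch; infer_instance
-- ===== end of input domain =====

-- B replaces A's O(n^2) selection-sort nested loop by the built-in sort (arr[:] = sorted(arr));
-- the binary-search block is unchanged. Both A and B mutate the passed list in place to the same
-- sorted contents; the theorems here are about the returned (list, index) value.

-- ===== PORT A =====
-- inner loop: min_index = i; for j in range(i+1, len(arr)): if arr[j] < arr[min_index]: min_index = j
-- (indices are always in range, so arr[j] is ported as getD j 0)
def selMin (l : List Int) (i : Nat) : Nat :=
  (List.range' (i + 1) (l.length - (i + 1))).foldl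
    (fun m j => if l.getD j 0 < l.getD m 0 then j else m) i

-- one iteration of the outer loop: find min_index, then arr[i], arr[min_index] = arr[min_index], arr[i]
def selStep (l : List Int) (i : Nat) : List Int :=
  let m := selMin l i
  (l.set i (l.getD m 0)).set m (l.getD i 0)

-- for i in range(len(arr)): …
def selSort (l : List Int) : List Int :=
  (List.range l.length).foldl selStep l

-- the binary-search while-loop (textually identical in A and B, so it is one shared helper);
-- fuel = len+1 only makes the recursion structural: the interval [left,right] shrinks by at
-- least 1 each iteration, so the fuel is never exhausted on the initial call.
def binSearch (arr : List Int) (target : Int) : Nat → Int → Int → Int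
  | 0, _, _ => -1
  | fuel + 1, left, right =>
    if left ≤ right then
      let mid := PySem.Int.floordiv (left + right) 2
      let v := PySem.List.pyGetD arr mid 0    -- arr[mid]; 0 ≤ left ≤ mid ≤ right < len here
      if v = target then mid
      else if v < target then binSearch arr target fuel (mid + 1) right
      else binSearch arr target fuel left (mid - 1)
    else -1

def sortAndSearch (arr : List Int) (target : Int) : List Int × Int :=
  let s := selSort arr
  (s, binSearch s target (s.length + 1) 0 ((s.length : Int) - 1))

-- ===== PORT B =====
-- arr[:] = sorted(arr), then the identical binary search
def sortAndSearch_alt (arr : List Int) (target : Int) : List Int × Int :=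
  let s := PySem.List.sorted arr (fun x => x) false
  (s, binSearch s target (s.length + 1) 0 ((s.length : Int) - 1))

-- ===== PRECONDITION & SPEC =====
def Spec_sortAndSearch (arr : List Int) (target : Int) (out : List Int × Int) : Prop := out = sortAndSearch_alt arr target
instance (arr : List Int) (target : Int) (out : List Int × Int) : Decidable (Spec_sortAndSearch arr target out) := by unfold Spec_sortAndSearch; infer_instance

-- ===== CLAIM (what is proved, stated in full; the proofs are below) =====
def Claim_equal_sortAndSearch : Prop := ∀ (arr : List Int) (target : Int), Dom_sortAndSearch arr target → Spec_sortAndSearch arr target (sortAndSearch arr target)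

-- ===== LEMMAS AND PROOFS =====

-- the inner foldl returns an index among {m} ∪ js whose value is minimal over {m} ∪ js
lemma foldl_argmin (l : List Int) (js : List Nat) : ∀ (m : Nat),
    (js.foldl (fun m j => if l.getD j 0 < l.getD m 0 then j else m) m = m
      ∨ js.foldl (fun m j => if l.getD j 0 < l.getD m 0 then j else m) m ∈ js)
    ∧ l.getD (js.foldl (fun m j => if l.getD j 0 < l.getD m 0 then j else m) m) 0 ≤ l.getD m 0
    ∧ ∀ j ∈ js, l.getD (js.foldl (fun m j => if l.getD j 0 < l.getD m 0 then j else m) m) 0 ≤ l.getD j 0 := by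
  induction js with
  | nil => intro m; simp
  | cons j js ih =>
    intro m
    simp only [List.foldl_cons]
    by_cases h : l.getD j 0 < l.getD m 0
    · simp only [if_pos h]
      obtain ⟨hmem, hle, hall⟩ := ih j
      refine ⟨?_, le_trans hle (le_of_lt h), ?_⟩
      · rcases hmem with h1 | h1
        · rw [h1]; simp
        · exact Or.inr (List.mem_cons_of_mem _ h1)
      · intro j' hj'
        rcases List.mem_cons.mp hj' with rfl | hj'
        · exact hle
        · exact hall j' hj'
    · simp only [if_neg h]
      obtain ⟨hmem, hle, hall⟩ := ih m
      refine ⟨?_, hle, ?_⟩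
      · rcases hmem with h1 | h1
        · rw [h1]; simp
        · exact Or.inr (List.mem_cons_of_mem _ h1)
      · intro j' hj'
        rcases List.mem_cons.mp hj' with rfl | hj'
        · exact le_trans hle (not_lt.mp h)
        · exact hall j' hj'

lemma selMin_bounds (l : List Int) (i : Nat) (hi : i < l.length) :
    i ≤ selMin l i ∧ selMin l i < l.length := by
  obtain ⟨hmem, -, -⟩ := foldl_argmin l (List.range' (i + 1) (l.length - (i + 1))) i
  unfold selMin
  rcases hmem with h | h
  · rw [h]; exact ⟨le_refl i, hi⟩
  · rw [List.mem_range'_1] at h; omega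

lemma selMin_min (l : List Int) (i : Nat) (hi : i < l.length) :
    ∀ j, i ≤ j → j < l.length → l.getD (selMin l i) 0 ≤ l.getD j 0 := by
  obtain ⟨-, hle, hall⟩ := foldl_argmin l (List.range' (i + 1) (l.length - (i + 1))) i
  intro j h1 h2
  rcases eq_or_lt_of_le h1 with rfl | h1
  · exact hle
  · exact hall j (by rw [List.mem_range'_1]; omega)

-- loop invariant after i outer iterations
def SelInv (n i : Nat) (l0 l : List Int) : Prop :=
  l.length = n ∧ l.Perm l0 ∧ (l.take i).Pairwise (· ≤ ·) ∧
    ∀ x ∈ l.take i, ∀ y ∈ l.drop i, x ≤ y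

lemma getD_mem_drop (l : List Int) (i m : Nat) (h1 : i ≤ m) (h2 : m < l.length) :
    l.getD m 0 ∈ l.drop i := by
  have hk : m - i < (l.drop i).length := by simp; omega
  have : (l.drop i)[m - i] = l[m] := by
    rw [List.getElem_drop]; congr 1; omega
  rw [List.getD_eq_getElem l 0 h2, ← this]
  exact List.getElem_mem hk

lemma selStep_inv (n i : Nat) (l0 l : List Int) (hi : i < n) (h : SelInv n i l0 l) :
    SelInv n (i + 1) l0 (selStep l i) := by
  obtain ⟨hlen, hperm, hpw, hbound⟩ := h
  have hin : i < l.length := by omega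
  obtain ⟨him, hmlt⟩ := selMin_bounds l i hin
  set m := selMin l i with hm
  set l' := (l.set i (l.getD m 0)).set m (l.getD i 0) with hl'
  have hstep : selStep l i = l' := rfl
  rw [hstep]
  have hlen' : l'.length = n := by simp [hl', hlen]
  -- permutation: the swap is List.set_set_perm
  have hperm' : l'.Perm l := by
    rw [hl', List.getD_eq_getElem l 0 hmlt, List.getD_eq_getElem l 0 hin]
    exact List.set_set_perm hin hmlt
  -- the prefix of length i is untouched
  have htake : l'.take i = l.take i := by
    rw [hl', List.take_set_of_le him, List.take_set_of_le (le_refl i)]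
  -- the new element at position i is the minimum of the old suffix
  have hi' : i < l'.length := by omega
  have hval : l'[i]'hi' = l.getD m 0 := by
    simp only [hl', List.getElem_set]
    by_cases hmi : m = i <;> simp [hmi]
  have hmin : ∀ y ∈ l.drop i, l'[i]'hi' ≤ y := by
    intro y hy
    obtain ⟨k, hk, rfl⟩ := List.mem_iff_getElem.mp hy
    have hklen : i + k < l.length := by simp at hk; omega
    have h1 : (l.drop i)[k]'hk = l.getD (i + k) 0 := by
      rw [List.getD_eq_getElem l 0 hklen]
      simp [List.getElem_drop]
    rw [h1, hval]
    exact selMin_min l i hin (i + k) (by omega) hklen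
  -- the suffixes from i are permutations of each other
  have hdropperm : (l'.drop i).Perm (l.drop i) := by
    have e1 : l.take i ++ l'.drop i = l' := by rw [← htake]; exact List.take_append_drop i l'
    have e2 : l.take i ++ l.drop i = l := List.take_append_drop i l
    have h1 : (l.take i ++ l'.drop i).Perm (l.take i ++ l.drop i) := by
      rw [e1, e2]; exact hperm'
    exact (List.perm_append_left_iff _).mp h1
  have htake' : l'.take (i + 1) = l.take i ++ [l'[i]'hi'] := by
    rw [← List.take_append_getElem hi', htake]
  have hdropsub : ∀ y ∈ l'.drop (i + 1), y ∈ l.drop i := by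
    intro y hy
    apply hdropperm.mem_iff.mp
    rw [List.drop_eq_getElem_cons hi']
    exact List.mem_cons_of_mem _ hy
  refine ⟨hlen', hperm'.trans hperm, ?_, ?_⟩
  · rw [htake', List.pairwise_append]
    refine ⟨hpw, List.pairwise_singleton _ _, ?_⟩
    intro x hx y hy
    rw [List.mem_singleton] at hy; subst hy
    rw [hval]
    exact hbound x hx _ (getD_mem_drop l i m him hmlt)
  · intro x hx y hy
    rw [htake'] at hx
    have hy' : y ∈ l.drop i := hdropsub y hy
    rcases List.mem_append.mp hx with hx | hx
    · exact hbound x hx y hy'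
    · rw [List.mem_singleton] at hx; subst hx
      exact hmin y hy'

lemma foldl_selStep_inv (n : Nat) : ∀ (k i : Nat) (l0 l : List Int), i + k = n → SelInv n i l0 l →
    SelInv n n l0 ((List.range' i k).foldl selStep l) := by
  intro k
  induction k with
  | zero => intro i l0 l hik h; simp; have : i = n := by omega
            subst this; exact h
  | succ k ih =>
    intro i l0 l hik h
    rw [List.range'_succ, List.foldl_cons]
    exact ih (i + 1) l0 (selStep l i) (by omega) (selStep_inv n i l0 l (by omega) h)

lemma selSort_eq_sorted (l : List Int) :
    selSort l = PySem.List.sorted l (fun x => x) false := by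
  have h0 : SelInv l.length 0 l l := ⟨rfl, List.Perm.refl l, by simp, by simp⟩
  have h := foldl_selStep_inv l.length l.length 0 l l (by omega) h0
  have hsel : selSort l = (List.range' 0 l.length).foldl selStep l := by
    rw [selSort, List.range_eq_range']
  rw [← hsel] at h
  obtain ⟨hlen, hperm, hpw, -⟩ := h
  have htake : (selSort l).take l.length = selSort l :=
    List.take_of_length_le (le_of_eq hlen)
  rw [htake] at hpw
  exact (PySem.List.sorted_id_eq_of_perm_of_pairwise _ _ hperm hpw).symm

-- ===== VERDICT (by name: the statement is the Claim_ definition above) =====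
theorem sortAndSearch_spec : Claim_equal_sortAndSearch := by
  intro arr target _
  unfold Spec_sortAndSearch sortAndSearch sortAndSearch_alt
  rw [selSort_eq_sorted]
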